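-- pv_equiv track=rewrite | github.com/sun10081/leetcode_practice_xiaorui | questions/1801_1900/1861_1870/1864_minimum_number_of_swap.py | minSwaps2
-- ===== SOURCE A (Python) =====
-- from math import inf
--
-- def minSwaps2(s: str) -> int:
--     n = len(s)
--     one_cnt = s.count('1')
--     if abs(one_cnt - (n - one_cnt)) >= 2:
--         return -1
--     # 10101
--     zero_cnt1, one_cnt1 = 0, 0
--     for i in range(n):
--         if not i % 2 and s[i] != '1':
--             zero_cnt1 += 1
--         if i % 2 and s[i] != '0':
--             one_cnt1 += 1
--     cnt1 = one_cnt1 if one_cnt1 == zero_cnt1 else inf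
--     # 01010
--     zero_cnt2, one_cnt2 = 0, 0
--     for i in range(n):
--         if not i % 2 and s[i] != '0':
--             one_cnt2 += 1
--         if i % 2 and s[i] != '1':
--             zero_cnt2 += 1
--     cnt2 = one_cnt2 if one_cnt2 == zero_cnt2 else inf
--     return min(cnt1, cnt2)
-- ===== SOURCE B (Python) =====
-- def minSwaps2(s: str) -> int:
--     # Classify the 1-bits by the parity of their index; feasibility and the answer
--     # follow from the imbalance d = 2*ones - n, no mismatch counting needed:
--     # the 1s must all land on even indices (d == 1 or d == 0) or all on odd
--     # indices (d == -1 or d == 0), and the misplaced 1s are exactly the swaps.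
--     n = len(s)
--     odd_ones = even_ones = 0
--     for i, c in enumerate(s):
--         if c == '1':
--             if i % 2:
--                 odd_ones += 1
--             else:
--                 even_ones += 1
--     d = 2 * (odd_ones + even_ones) - n
--     if d >= 2 or d <= -2:
--         return -1
--     if d == 1:
--         return odd_ones
--     if d == -1:
--         return even_ones
--     return min(odd_ones, even_ones)
-- ===== Notes on version B (the rewrite author's own statement) =====
-- stated objective: simpler
-- what changed: Instead of counting mismatches against both alternating patterns (A's four counters with infinity sentinels), B never compares the string to a pattern: it classifies the 1-bits by index parity in one pass and reads the answer off the imbalance d = 2*ones - n (d=1 -> odd-positioned ones, d=-1 -> even-positioned ones, d=0 -> the smaller class), since the misplaced ones are exactly the needed swaps.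
-- outside the precondition, e.g. on minSwaps2('1a'): A returns 1, B returns 0; on minSwaps2('a'): A returns inf, B returns 0
import Mathlib
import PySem

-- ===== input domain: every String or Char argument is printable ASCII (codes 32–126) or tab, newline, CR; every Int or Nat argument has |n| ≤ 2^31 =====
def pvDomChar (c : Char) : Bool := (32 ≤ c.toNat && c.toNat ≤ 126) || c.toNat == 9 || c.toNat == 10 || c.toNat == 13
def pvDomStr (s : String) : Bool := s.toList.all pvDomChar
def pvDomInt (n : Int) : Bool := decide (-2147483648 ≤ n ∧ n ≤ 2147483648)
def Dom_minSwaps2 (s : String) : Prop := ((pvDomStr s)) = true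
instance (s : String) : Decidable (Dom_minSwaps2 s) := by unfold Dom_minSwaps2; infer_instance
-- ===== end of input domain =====

-- B classifies the 1-bits by index parity and reads the answer off the imbalance 2*ones - n,
-- instead of A's two mismatch-counting loops against both patterns (objective: simpler).

-- ===== PORT A =====
def minSwaps2 (s : String) : Int :=
  let n : Int := PySem.Str.len s
  let one_cnt : Int := (PySem.Str.count s "1" : Int)
  if |one_cnt - (n - one_cnt)| ≥ 2 then -1
  else
    -- 10101  (two independent counter updates per index, kept as a pair state)
    let p1 := (PySem.List.pyRange 0 n 1).foldl
      (fun (zo : Int × Int) i =>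
        ((if PySem.Int.mod i 2 == 0 && PySem.Str.pyGet? s i != some '1' then zo.1 + 1 else zo.1),
         (if PySem.Int.mod i 2 != 0 && PySem.Str.pyGet? s i != some '0' then zo.2 + 1 else zo.2)))
      (0, 0)
    let cnt1 : Option Int := if p1.2 == p1.1 then some p1.2 else none   -- none = float inf
    -- 01010
    let p2 := (PySem.List.pyRange 0 n 1).foldl
      (fun (zo : Int × Int) i =>
        ((if PySem.Int.mod i 2 != 0 && PySem.Str.pyGet? s i != some '1' then zo.1 + 1 else zo.1),
         (if PySem.Int.mod i 2 == 0 && PySem.Str.pyGet? s i != some '0' then zo.2 + 1 else zo.2)))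
      (0, 0)
    let cnt2 : Option Int := if p2.2 == p2.1 then some p2.2 else none   -- none = float inf
    match cnt1, cnt2 with
    | some a, some b => min a b
    | some a, none => a
    | none, some b => b
    | none, none => 0   -- Python returns float('inf') here: not an Int value; such inputs are outside Pre_

-- ===== PORT B =====
def minSwaps2_alt (s : String) : Int :=
  let n : Int := PySem.Str.len s
  -- one pass over enumerate(s): classify the '1' characters by index parity
  let p := (PySem.List.enumerate s.toList 0).foldl
    (fun (oe : Int × Int) ic =>
      ((if ic.2 == '1' && !(PySem.Int.mod ic.1 2 == 0) then oe.1 + 1 else oe.1),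
       (if ic.2 == '1' && PySem.Int.mod ic.1 2 == 0 then oe.2 + 1 else oe.2)))
    (0, 0)
  let d : Int := 2 * (p.1 + p.2) - n
  if d ≥ 2 ∨ d ≤ -2 then -1
  else if d = 1 then p.1
  else if d = -1 then p.2
  else min p.1 p.2

-- ===== PRECONDITION & SPEC =====
-- Pre_ excludes strings containing characters other than '0'/'1' that still pass the balance
-- guard: the function is specified on binary strings only, and on such inputs A can return
-- float('inf'), which is not a value of the declared int type.
def Pre_minSwaps2 (s : String) : Prop :=
  (s.toList.all (fun c => c == '0' || c == '1') = true) ∨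
    |2 * (PySem.Str.count s "1" : Int) - (s.toList.length : Int)| ≥ 2
instance (s : String) : Decidable (Pre_minSwaps2 s) := by unfold Pre_minSwaps2; infer_instance
def pvWitness_minSwaps2 : String := "100"

def Spec_minSwaps2 (s : String) (out : Int) : Prop := out = minSwaps2_alt s
instance (s : String) (out : Int) : Decidable (Spec_minSwaps2 s out) := by unfold Spec_minSwaps2; infer_instance

-- ===== CLAIM (what is proved, stated in full; the proofs are below) =====
def Claim_equal_minSwaps2 : Prop := ∀ (s : String), Dom_minSwaps2 s → Pre_minSwaps2 s → Spec_minSwaps2 s (minSwaps2 s)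

-- ===== LEMMAS AND PROOFS =====

-- count of characters satisfying a (start-index aware) predicate, the common spec of both ports' loops
def pvCntE (q : Int → Char → Bool) : List Char → Int → Nat
  | [], _ => 0
  | c :: t, k => (if q k c then 1 else 0) + pvCntE q t (k + 1)

theorem pvCntE_congr (q q' : Int → Char → Bool) (h : ∀ k c, q k c = q' k c) :
    ∀ (l : List Char) (k : Int), pvCntE q l k = pvCntE q' l k := by
  intro l
  induction l with
  | nil => intro k; rfl
  | cons c t ih => intro k; simp [pvCntE, h, ih]

-- A's index loop over range(n) counts exactly pvCntE over the string's characters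
theorem pvCount_range (l : List Char) (q : Int → Option Char → Bool) (a : Nat) (h : a ≤ l.length) :
    List.countP (fun i => q i (PySem.List.pyGet? l i)) (PySem.List.pyRange a l.length 1)
      = pvCntE (fun k c => q k (some c)) (l.drop a) a := by
  induction hn : l.length - a generalizing a with
  | zero =>
    have ha : a = l.length := by omega
    subst ha
    rw [PySem.List.pyRange_one_eq_nil (by omega), List.drop_length]
    rfl
  | succ m ih =>
    have hlt : a < l.length := by omega
    rw [PySem.List.pyRange_one_cons (by exact_mod_cast hlt), List.countP_cons,
        List.drop_eq_getElem_cons hlt]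
    have h1 : PySem.List.pyGet? l (a : Int) = some l[a] := by
      rw [PySem.List.pyGet?_natCast]; simp [hlt]
    have h2 : ((a : Int) + 1) = ((a + 1 : Nat) : Int) := by push_cast; ring
    rw [h1, h2, ih (a + 1) (by omega) (by omega)]
    simp [pvCntE]
    omega

-- s.count('1') counts the '1' characters
theorem pvCountGo_single (c : Char) (l : List Char) (fuel acc : Nat) (h : l.length ≤ fuel) :
    PySem.Chars.count.go [c] fuel l acc = acc + l.countP (· == c) := by
  induction l generalizing fuel acc with
  | nil => cases fuel <;> simp [PySem.Chars.count.go]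
  | cons x t ih =>
    cases fuel with
    | zero => simp at h
    | succ f =>
      rw [PySem.Chars.count.go]
      by_cases hx : c = x
      · subst hx
        simp [List.isPrefixOf, ih _ _ (by simpa using h)]
        omega
      · have : ([c].isPrefixOf (x :: t)) = false := by
          simp [List.isPrefixOf]
          exact fun hcx => absurd hcx hx
        rw [this]
        simp [List.countP_cons, ih _ _ (by simpa using h)]
        simp [Ne.symm hx]

theorem pvCount_one (l : List Char) : PySem.Chars.count l ['1'] = l.countP (· == '1') := by
  simp [PySem.Chars.count, pvCountGo_single '1' l l.length 0 (le_refl _)]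

-- the clean predicates (emod form): A's four counters, B's two classes, and the even indices
def pvQz1 (k : Int) (c : Char) : Bool := k % 2 == 0 && c != '1'
def pvQo1 (k : Int) (c : Char) : Bool := !(k % 2 == 0) && c != '0'
def pvQz2 (k : Int) (c : Char) : Bool := !(k % 2 == 0) && c != '1'
def pvQo2 (k : Int) (c : Char) : Bool := k % 2 == 0 && c != '0'
def pvQoo (k : Int) (c : Char) : Bool := c == '1' && !(k % 2 == 0)
def pvQeo (k : Int) (c : Char) : Bool := c == '1' && (k % 2 == 0)
def pvQe (k : Int) (_ : Char) : Bool := k % 2 == 0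

-- for ANY string: the '1's split by index parity, and the even-index count vs length
theorem pvSplitOnes (l : List Char) :
    ∀ (k : Int),
      ((l.countP (· == '1') : Int) = pvCntE pvQeo l k + pvCntE pvQoo l k)
      ∧ (2 * (pvCntE pvQe l k : Int)
          = l.length + (if k % 2 = 0 then (l.length : Int) % 2 else -((l.length : Int) % 2))) := by
  induction l with
  | nil => intro k; simp [pvCntE]
  | cons c t ih =>
    intro k
    obtain ⟨i1, i2⟩ := ih (k + 1)
    by_cases hke : k % 2 = 0
    · rw [if_neg (show ¬ ((k + 1) % 2 = 0) by omega)] at i2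
      by_cases hc : c = '1' <;>
        simp only [pvCntE, pvQoo, pvQeo, pvQe, List.countP_cons, List.length_cons] <;>
        simp [hke, hc] <;> push_cast <;> omega
    · rw [if_pos (show (k + 1) % 2 = 0 by omega)] at i2
      by_cases hc : c = '1' <;>
        simp only [pvCntE, pvQoo, pvQeo, pvQe, List.countP_cons, List.length_cons] <;>
        simp [hke, hc] <;> push_cast <;> omega

-- for binary strings: A's four pattern counters expressed through B's two parity classes
theorem pvMaster (l : List Char) (hb : ∀ c ∈ l, c = '0' ∨ c = '1') :
    ∀ (k : Int),
      ((pvCntE pvQz1 l k : Int) + pvCntE pvQeo l k = pvCntE pvQe l k)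
      ∧ (pvCntE pvQo1 l k = pvCntE pvQoo l k)
      ∧ ((pvCntE pvQz2 l k : Int) + pvCntE pvQoo l k = (l.length : Int) - pvCntE pvQe l k)
      ∧ (pvCntE pvQo2 l k = pvCntE pvQeo l k) := by
  induction l with
  | nil => intro k; simp [pvCntE]
  | cons c t ih =>
    intro k
    have hc := hb c (by simp)
    have ht : ∀ x ∈ t, x = '0' ∨ x = '1' := fun x hx => hb x (by simp [hx])
    obtain ⟨i1, i2, i3, i4⟩ := ih ht (k + 1)
    by_cases hke : k % 2 = 0 <;>
      rcases hc with hc | hc <;> subst hc <;>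
        simp only [pvCntE, pvQz1, pvQo1, pvQz2, pvQo2, pvQoo, pvQeo, pvQe,
          List.length_cons] <;>
        simp [hke] <;> push_cast <;> omega

-- A's pair-state loop computes the pair of counts
theorem pvA_pair (l : List Char) (C1 C2 : Int → Option Char → Bool) :
    (PySem.List.pyRange 0 (l.length : Int) 1).foldl
      (fun (zo : Int × Int) i =>
        ((if C1 i (PySem.List.pyGet? l i) then zo.1 + 1 else zo.1),
         (if C2 i (PySem.List.pyGet? l i) then zo.2 + 1 else zo.2))) (0, 0)
    = ((pvCntE (fun k c => C1 k (some c)) l 0 : Int),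
       (pvCntE (fun k c => C2 k (some c)) l 0 : Int)) := by
  rw [PySem.List.foldl_prod_mk (fun a i => if C1 i (PySem.List.pyGet? l i) then a + 1 else a)
      (fun a i => if C2 i (PySem.List.pyGet? l i) then a + 1 else a),
      PySem.List.foldl_count_if, PySem.List.foldl_count_if]
  have h1 := pvCount_range l C1 0 (by omega)
  have h2 := pvCount_range l C2 0 (by omega)
  simp only [Nat.cast_zero, List.drop_zero] at h1 h2
  rw [h1, h2]
  simp

-- B's pair-state loop over enumerate computes the pair of counts
theorem pvB_pair_go (C1 C2 : Int → Char → Bool) (l : List Char) :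
    ∀ (k a b : Int),
      (PySem.List.enumerate l k).foldl
        (fun (oe : Int × Int) ic =>
          ((if C1 ic.1 ic.2 then oe.1 + 1 else oe.1),
           (if C2 ic.1 ic.2 then oe.2 + 1 else oe.2))) (a, b)
      = (a + (pvCntE C1 l k : Int), b + (pvCntE C2 l k : Int)) := by
  induction l with
  | nil => intro k a b; simp [PySem.List.enumerate_nil, pvCntE]
  | cons c t ih =>
    intro k a b
    rw [PySem.List.enumerate_cons]
    simp only [List.foldl_cons]
    rw [ih (k + 1)]
    simp only [pvCntE]
    by_cases h1 : C1 k c <;> by_cases h2 : C2 k c <;>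
      simp [h1, h2, Prod.ext_iff] <;> push_cast <;> omega

theorem pvB_pair (l : List Char) (C1 C2 : Int → Char → Bool) :
    (PySem.List.enumerate l 0).foldl
      (fun (oe : Int × Int) ic =>
        ((if C1 ic.1 ic.2 then oe.1 + 1 else oe.1),
         (if C2 ic.1 ic.2 then oe.2 + 1 else oe.2))) (0, 0)
    = ((pvCntE C1 l 0 : Int), (pvCntE C2 l 0 : Int)) := by
  simpa using pvB_pair_go C1 C2 l 0 0 0

-- ===== VERDICT (by name: the statement is the Claim_ definition above) =====
theorem minSwaps2_spec : Claim_equal_minSwaps2 := by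
  intro s _ hpre
  unfold Spec_minSwaps2 minSwaps2 minSwaps2_alt
  simp only []
  have h2pos : (0 : Int) < 2 := by norm_num
  have hB : (PySem.List.enumerate s.toList 0).foldl
      (fun (oe : Int × Int) ic =>
        ((if ic.2 == '1' && !(PySem.Int.mod ic.1 2 == 0) then oe.1 + 1 else oe.1),
         (if ic.2 == '1' && PySem.Int.mod ic.1 2 == 0 then oe.2 + 1 else oe.2)))
      (0, 0)
      = ((pvCntE (fun k c => c == '1' && !(PySem.Int.mod k 2 == 0)) s.toList 0 : Int),
         (pvCntE (fun k c => c == '1' && (PySem.Int.mod k 2 == 0)) s.toList 0 : Int)) :=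
    pvB_pair s.toList (fun k c => c == '1' && !(PySem.Int.mod k 2 == 0))
      (fun k c => c == '1' && (PySem.Int.mod k 2 == 0))
  have hA1 : (PySem.List.pyRange 0 (PySem.Str.len s) 1).foldl
      (fun (zo : Int × Int) i =>
        ((if PySem.Int.mod i 2 == 0 && PySem.Str.pyGet? s i != some '1' then zo.1 + 1 else zo.1),
         (if PySem.Int.mod i 2 != 0 && PySem.Str.pyGet? s i != some '0' then zo.2 + 1 else zo.2)))
      (0, 0)
      = ((pvCntE (fun k c => PySem.Int.mod k 2 == 0 && some c != some '1') s.toList 0 : Int),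
         (pvCntE (fun k c => PySem.Int.mod k 2 != 0 && some c != some '0') s.toList 0 : Int)) :=
    pvA_pair s.toList (fun k o => PySem.Int.mod k 2 == 0 && o != some '1')
      (fun k o => PySem.Int.mod k 2 != 0 && o != some '0')
  have hA2 : (PySem.List.pyRange 0 (PySem.Str.len s) 1).foldl
      (fun (zo : Int × Int) i =>
        ((if PySem.Int.mod i 2 != 0 && PySem.Str.pyGet? s i != some '1' then zo.1 + 1 else zo.1),
         (if PySem.Int.mod i 2 == 0 && PySem.Str.pyGet? s i != some '0' then zo.2 + 1 else zo.2)))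
      (0, 0)
      = ((pvCntE (fun k c => PySem.Int.mod k 2 != 0 && some c != some '1') s.toList 0 : Int),
         (pvCntE (fun k c => PySem.Int.mod k 2 == 0 && some c != some '0') s.toList 0 : Int)) :=
    pvA_pair s.toList (fun k o => PySem.Int.mod k 2 != 0 && o != some '1')
      (fun k o => PySem.Int.mod k 2 == 0 && o != some '0')
  have e1 : pvCntE (fun k c => PySem.Int.mod k 2 == 0 && some c != some '1') s.toList 0
      = pvCntE pvQz1 s.toList 0 :=
    pvCntE_congr _ _ (by
      intro k c
      simp [pvQz1, bne, Option.some_beq_some]) _ _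
  have e2 : pvCntE (fun k c => PySem.Int.mod k 2 != 0 && some c != some '0') s.toList 0
      = pvCntE pvQo1 s.toList 0 :=
    pvCntE_congr _ _ (by
      intro k c
      simp [pvQo1, bne, Option.some_beq_some]) _ _
  have e3 : pvCntE (fun k c => PySem.Int.mod k 2 != 0 && some c != some '1') s.toList 0
      = pvCntE pvQz2 s.toList 0 :=
    pvCntE_congr _ _ (by
      intro k c
      simp [pvQz2, bne, Option.some_beq_some]) _ _
  have e4 : pvCntE (fun k c => PySem.Int.mod k 2 == 0 && some c != some '0') s.toList 0
      = pvCntE pvQo2 s.toList 0 :=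
    pvCntE_congr _ _ (by
      intro k c
      simp [pvQo2, bne, Option.some_beq_some]) _ _
  have eB1 : pvCntE (fun k c => c == '1' && !(PySem.Int.mod k 2 == 0)) s.toList 0
      = pvCntE pvQoo s.toList 0 :=
    pvCntE_congr _ _ (by
      intro k c
      simp [pvQoo]) _ _
  have eB2 : pvCntE (fun k c => c == '1' && (PySem.Int.mod k 2 == 0)) s.toList 0
      = pvCntE pvQeo s.toList 0 :=
    pvCntE_congr _ _ (by
      intro k c
      simp [pvQeo]) _ _
  rw [e1, e2] at hA1
  rw [e3, e4] at hA2
  rw [eB1, eB2] at hB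
  have hcnt : (PySem.Str.count s "1" : Int) = (s.toList.countP (· == '1') : Int) := by
    have : PySem.Str.count s "1" = PySem.Chars.count s.toList ['1'] := rfl
    rw [this, pvCount_one]
  have hlen : PySem.Str.len s = (s.toList.length : Int) := PySem.Str.len_eq s
  obtain ⟨hsplit, heven⟩ := pvSplitOnes s.toList 0
  rw [if_pos (show (0 : Int) % 2 = 0 by norm_num)] at heven
  rw [hA1, hA2, hB, hcnt, hlen]
  set OO : Int := (pvCntE pvQoo s.toList 0 : Int) with hOO
  set EO : Int := (pvCntE pvQeo s.toList 0 : Int) with hEO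
  set n : Int := (s.toList.length : Int) with hn
  set ones : Int := (s.toList.countP (· == '1') : Int) with hones
  have hgiff : |ones - (n - ones)| = |2 * ones - n| := by ring_nf
  rw [hgiff]
  have hEq : ones = EO + OO := hsplit
  by_cases hg : |2 * ones - n| ≥ 2
  · have hg' := hg
    rw [ge_iff_le, le_abs] at hg'
    rw [if_pos hg, if_pos (show 2 * (OO + EO) - n ≥ 2 ∨ 2 * (OO + EO) - n ≤ -2 by omega)]
  · rw [if_neg hg]
    rw [ge_iff_le, not_le, abs_lt] at hg
    have hgB : ¬ (2 * (OO + EO) - n ≥ 2 ∨ 2 * (OO + EO) - n ≤ -2) := by omega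
    rw [if_neg hgB]
    have hbin : ∀ c ∈ s.toList, c = '0' ∨ c = '1' := by
      rcases hpre with hb | hbig
      · intro c hc
        have := List.all_eq_true.mp hb c hc
        simpa using this
      · exfalso
        rw [hcnt, ← hn, ge_iff_le, le_abs] at hbig
        omega
    obtain ⟨m1, m2, m3, m4⟩ := pvMaster s.toList hbin 0
    set E : Int := (pvCntE pvQe s.toList 0 : Int) with hE
    by_cases h1 : ((pvCntE pvQo1 s.toList 0 : Int) == (pvCntE pvQz1 s.toList 0 : Int)) = true <;>
      by_cases h2 : ((pvCntE pvQo2 s.toList 0 : Int) == (pvCntE pvQz2 s.toList 0 : Int)) = true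
    · rw [if_pos h1, if_pos h2]
      rw [beq_iff_eq] at h1 h2
      have hd0 : 2 * (OO + EO) - n = 0 := by omega
      rw [if_neg (by omega), if_neg (by omega)]
      show min ((pvCntE pvQo1 s.toList 0 : Int)) ((pvCntE pvQo2 s.toList 0 : Int)) = min OO EO
      omega
    · rw [if_pos h1, if_neg h2]
      rw [beq_iff_eq] at h1
      rw [beq_iff_eq] at h2
      have hd1 : 2 * (OO + EO) - n = 1 := by omega
      rw [if_pos (by omega)]
      show ((pvCntE pvQo1 s.toList 0 : Int)) = OO
      omega
    · rw [if_neg h1, if_pos h2]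
      rw [beq_iff_eq] at h1
      rw [beq_iff_eq] at h2
      have hdm1 : 2 * (OO + EO) - n = -1 := by omega
      rw [if_neg (by omega), if_pos (by omega)]
      show ((pvCntE pvQo2 s.toList 0 : Int)) = EO
      omega
    · exfalso
      rw [beq_iff_eq] at h1 h2
      omega
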